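-- pv_equiv track=rewrite | github.com/VladimirBelony-dev/FL_business_list | bizprofile_scraper.py | clean_search_term
-- ===== SOURCE A (Python) =====
-- def clean_search_term(company_name):
--     """Clean company name for better search results"""
--     # Remove common suffixes
--     suffixes = ['LLC', 'INC', 'CORP', 'LTD', 'LP', 'PA', 'PLLC', 'PC']
--     cleaned = company_name.upper().strip()
--
--     for suffix in suffixes:
--         if cleaned.endswith(f' {suffix}'):
--             cleaned = cleaned[:-len(f' {suffix}')].strip()
--             break
--
--     return cleaned
-- ===== SOURCE B (Python) =====
-- # DFA (trie of reversed suffixes): scan the cleaned string once from the end;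
-- # cut when an accepting state is reached and the preceding char is a space.
-- _ACCEPT = {7, 8, 9, 11, 13, 15, 17, 18}
-- _TRANS = {(0, 'C'): 1, (0, 'P'): 2, (0, 'D'): 3, (0, 'A'): 4,
--           (1, 'L'): 5, (1, 'N'): 6, (1, 'P'): 13,
--           (5, 'L'): 7, (7, 'P'): 8, (6, 'I'): 9,
--           (2, 'R'): 10, (2, 'L'): 11,
--           (10, 'O'): 14, (14, 'C'): 15,
--           (3, 'T'): 16, (16, 'L'): 17,
--           (4, 'P'): 18}
--
--
-- def clean_search_term(company_name):
--     """Clean company name for better search results"""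
--     cleaned = company_name.upper().strip()
--     state = 0
--     for i in range(len(cleaned) - 1, -1, -1):
--         ch = cleaned[i]
--         if state in _ACCEPT and ch == ' ':
--             return cleaned[:i].strip()
--         state = _TRANS.get((state, ch))
--         if state is None:
--             break
--     return cleaned
-- ===== Notes on version B (the rewrite author's own statement) =====
-- stated objective: alternative
-- what changed: Replaces A's loop of 8 endswith-and-slice attempts with a precompiled trie/DFA of the reversed suffixes: one backward scan of the cleaned string drives a (state,char) transition table and cuts at the first accepting state followed by a space.
import Mathlib
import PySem

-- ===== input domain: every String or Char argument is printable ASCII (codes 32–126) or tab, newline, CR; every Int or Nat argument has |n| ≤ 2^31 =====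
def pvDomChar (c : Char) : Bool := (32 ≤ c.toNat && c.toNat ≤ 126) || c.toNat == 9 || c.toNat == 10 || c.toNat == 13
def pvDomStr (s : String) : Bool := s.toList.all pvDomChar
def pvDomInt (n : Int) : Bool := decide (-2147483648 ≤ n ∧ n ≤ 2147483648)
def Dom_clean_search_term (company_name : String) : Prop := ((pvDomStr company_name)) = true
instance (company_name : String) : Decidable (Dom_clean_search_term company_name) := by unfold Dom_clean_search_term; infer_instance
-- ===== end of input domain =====

-- B replaces A's 8-iteration endswith-and-slice scan by a precompiled trie/DFA of the
-- REVERSED suffixes, walked once backwards over the cleaned string; objective: alternative.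

-- ===== PORT A =====
def pvSuffixesA : List (List Char) :=
  [['L','L','C'], ['I','N','C'], ['C','O','R','P'], ['L','T','D'],
   ['L','P'], ['P','A'], ['P','L','L','C'], ['P','C']]

-- the for-loop with break: first suffix with cleaned.endswith(' '+suffix) strips and stops
def pvALoop (sufs : List (List Char)) (cleaned : List Char) : List Char :=
  match sufs with
  | [] => cleaned
  | suf :: rest =>
    if PySem.Chars.endswith cleaned (' ' :: suf) then
      PySem.Chars.strip (PySem.List.slice cleaned none (some (-((suf.length : Int) + 1))))
    else pvALoop rest cleaned

def clean_search_term (company_name : String) : String :=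
  String.ofList (pvALoop pvSuffixesA (PySem.Chars.strip (PySem.Chars.upper company_name.toList)))

-- ===== PORT B =====
-- _TRANS of Source B: trie of the reversed suffixes as a (state, char) → state table
def pvTrans : List ((Nat × Char) × Nat) :=
  [((0,'C'),1), ((0,'P'),2), ((0,'D'),3), ((0,'A'),4),
   ((1,'L'),5), ((1,'N'),6), ((1,'P'),13),
   ((5,'L'),7), ((7,'P'),8), ((6,'I'),9),
   ((2,'R'),10), ((2,'L'),11),
   ((10,'O'),14), ((14,'C'),15),
   ((3,'T'),16), ((16,'L'),17),
   ((4,'P'),18)]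

def pvDelta (st : Nat) (c : Char) : Option Nat :=
  (pvTrans.find? (fun e => e.1 == (st, c))).map (·.2)

-- _ACCEPT of Source B
def pvAccept (st : Nat) : Bool := [7,8,9,11,13,15,17,18].contains st

-- Source B's backward index loop: the recursion walks the REVERSED cleaned string;
-- at position i the remaining reversed chars are cleaned[i] :: (reverse of cleaned[:i]),
-- so 'return cleaned[:i].strip()' is 'some rest.reverse' (stripped by the caller)
def pvBLoop (st : Nat) : List Char → Option (List Char)
  | [] => none
  | c :: rest =>
    if pvAccept st && c == ' ' then some rest.reverse
    else
      match pvDelta st c with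
      | none => none
      | some st' => pvBLoop st' rest

def clean_search_term_alt (company_name : String) : String :=
  match pvBLoop 0 (PySem.Chars.strip (PySem.Chars.upper company_name.toList)).reverse with
  | some h => String.ofList (PySem.Chars.strip h)
  | none => String.ofList (PySem.Chars.strip (PySem.Chars.upper company_name.toList))

-- ===== PRECONDITION & SPEC =====
def Spec_clean_search_term (company_name : String) (out : String) : Prop := out = clean_search_term_alt company_name
instance (company_name : String) (out : String) : Decidable (Spec_clean_search_term company_name out) := by unfold Spec_clean_search_term; infer_instance

-- ===== CLAIM (what is proved, stated in full; the proofs are below) =====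
def Claim_equal_clean_search_term : Prop := ∀ (company_name : String), Dom_clean_search_term company_name → Spec_clean_search_term company_name (clean_search_term company_name)

-- ===== LEMMAS AND PROOFS =====

-- exact hand model of str.rpartition on a single space (proof tool only):
-- none = no space in the list; some (head, last) = pieces around the LAST space
def pvRPartSp : List Char → Option (List Char × List Char)
  | [] => none
  | c :: rest =>
    match pvRPartSp rest with
    | some (h, l) => some (c :: h, l)
    | none => if c = ' ' then some ([], rest) else none

theorem pvRPartSp_none (cs : List Char) : pvRPartSp cs = none ↔ ' ' ∉ cs := by
  induction cs with
  | nil => simp [pvRPartSp]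
  | cons c rest ih =>
    simp only [pvRPartSp]
    cases hr : pvRPartSp rest with
    | some p => simp only [hr] at ih ⊢
                constructor
                · intro h; cases h
                · intro h; exact absurd (ih.mpr (fun hm => h (List.mem_cons_of_mem _ hm))) (by simp)
    | none =>
      have hns : ' ' ∉ rest := (ih).mp hr
      by_cases hc : c = ' '
      · simp [hc, hns]
      · simp [hc, hns, Ne.symm hc]

theorem pvRPartSp_some (cs h l : List Char) (hs : pvRPartSp cs = some (h, l)) :
    cs = h ++ ' ' :: l ∧ ' ' ∉ l := by
  induction cs generalizing h l with
  | nil => simp [pvRPartSp] at hs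
  | cons c rest ih =>
    simp only [pvRPartSp] at hs
    cases hr : pvRPartSp rest with
    | some p =>
      rw [hr] at hs
      obtain ⟨h', l'⟩ := p
      simp only [Option.some.injEq, Prod.mk.injEq] at hs
      obtain ⟨hc, hl⟩ := hs
      obtain ⟨heq, hnl⟩ := ih h' l' hr
      subst hl
      refine ⟨?_, hnl⟩
      rw [← hc, heq]; simp
    | none =>
      rw [hr] at hs
      have hns : ' ' ∉ rest := (pvRPartSp_none rest).mp hr
      by_cases hc : c = ' '
      · subst hc
        rw [if_pos rfl] at hs
        injection hs with hp
        injection hp with hh hl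
        subst hh; subst hl
        exact ⟨by simp, hns⟩
      · simp [hc] at hs

theorem pvSuffix_total {x y c : List Char} (hx : x <:+ c) (hy : y <:+ c) :
    x <:+ y ∨ y <:+ x := by
  rw [← List.reverse_prefix] at hx hy
  rcases List.prefix_or_prefix_of_prefix hx hy with h | h
  · left; rw [← List.reverse_prefix]; exact h
  · right; rw [← List.reverse_prefix]; exact h

-- A's endswith test at a space-free last token: it fires exactly for that token
theorem pvEndswith_iff (h l suf : List Char) (hnl : ' ' ∉ l) (hns : ' ' ∉ suf) :
    PySem.Chars.endswith (h ++ ' ' :: l) (' ' :: suf) = true ↔ suf = l := by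
  rw [PySem.Chars.endswith_iff]
  constructor
  · intro hsfx
    have hl : (' ' :: l) <:+ h ++ ' ' :: l := List.suffix_append h _
    rcases pvSuffix_total hsfx hl with hcase | hcase
    · rcases List.suffix_cons_iff.mp hcase with heq | hsub
      · exact (List.cons.inj heq).2
      · exact absurd (hsub.subset (List.mem_cons_self ..)) hnl
    · rcases List.suffix_cons_iff.mp hcase with heq | hsub
      · exact ((List.cons.inj heq).2).symm
      · exact absurd (hsub.subset (List.mem_cons_self ..)) hns
  · rintro rfl
    exact List.suffix_append h _

-- the negative-end slice in A removes exactly ' ' :: l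
theorem pvSlice_cut (h l : List Char) :
    PySem.List.slice (h ++ ' ' :: l) none (some (-((l.length : Int) + 1))) = h := by
  have hcl : PySem.List.clampIdx (h ++ ' ' :: l).length (-((l.length : Int) + 1)) = h.length := by
    have hlen : (h ++ ' ' :: l).length = h.length + l.length + 1 := by
      simp only [List.length_append, List.length_cons]
      omega
    rw [hlen]
    unfold PySem.List.clampIdx
    split_ifs <;> omega
  simp only [PySem.List.slice, hcl]
  exact List.take_left

-- A's loop on a string whose last space-delimited token is l
theorem pvALoop_split (sufs : List (List Char)) (h l : List Char)
    (hnl : ' ' ∉ l) (hnos : ∀ s ∈ sufs, ' ' ∉ s) :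
    pvALoop sufs (h ++ ' ' :: l) =
      if l ∈ sufs then PySem.Chars.strip h else h ++ ' ' :: l := by
  induction sufs with
  | nil => simp [pvALoop]
  | cons suf rest ih =>
    have hns : ' ' ∉ suf := hnos suf (List.mem_cons_self ..)
    by_cases hseq : suf = l
    · rw [hseq] at hns ⊢
      rw [pvALoop, if_pos ((pvEndswith_iff h l l hnl hns).mpr rfl), pvSlice_cut]
      rw [if_pos (List.mem_cons_self ..)]
    · have hne : PySem.Chars.endswith (h ++ ' ' :: l) (' ' :: suf) = false := by
        rw [Bool.eq_false_iff]
        intro hcon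
        exact hseq ((pvEndswith_iff h l suf hnl hns).mp hcon)
      rw [pvALoop, hne]
      simp only [Bool.false_eq_true, if_false]
      rw [ih (fun s hs => hnos s (List.mem_cons_of_mem _ hs))]
      have hmemiff : l ∈ suf :: rest ↔ l ∈ rest := by
        constructor
        · intro hm
          rcases List.mem_cons.mp hm with he | hm'
          · exact absurd he.symm hseq
          · exact hm'
        · exact fun hm => List.mem_cons_of_mem _ hm
      rw [if_congr hmemiff rfl rfl]

-- A's loop on a space-free string is the identity
theorem pvALoop_nospace (sufs : List (List Char)) (cs : List Char) (hns : ' ' ∉ cs) :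
    pvALoop sufs cs = cs := by
  induction sufs with
  | nil => rfl
  | cons suf rest ih =>
    have hne : PySem.Chars.endswith cs (' ' :: suf) = false := by
      rw [Bool.eq_false_iff]
      intro hcon
      exact hns (((PySem.Chars.endswith_iff _ _).mp hcon).subset (List.mem_cons_self ..))
    rw [pvALoop, hne]
    simpa using ih

-- ---- DFA side ----

-- the plain δ-run of the DFA (proof tool; pvBLoop specialises to it on space-free input)
def pvRun (st : Nat) : List Char → Option Nat
  | [] => some st
  | c :: rest =>
    match pvDelta st c with
    | none => none
    | some st' => pvRun st' rest

-- unique access path of each trie state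
def pvAccess : Nat → List Char
  | 1 => ['C'] | 2 => ['P'] | 3 => ['D'] | 4 => ['A']
  | 5 => ['C','L'] | 6 => ['C','N'] | 7 => ['C','L','L'] | 8 => ['C','L','L','P']
  | 9 => ['C','N','I'] | 10 => ['P','R'] | 11 => ['P','L'] | 13 => ['C','P']
  | 14 => ['P','R','O'] | 15 => ['P','R','O','C'] | 16 => ['D','T'] | 17 => ['D','T','L']
  | 18 => ['A','P'] | _ => []

theorem pvDelta_mem {st : Nat} {c : Char} {st' : Nat} (h : pvDelta st c = some st') :
    ((st, c), st') ∈ pvTrans := by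
  unfold pvDelta at h
  cases hf : pvTrans.find? (fun e => e.1 == (st, c)) with
  | none => rw [hf] at h; simp at h
  | some e =>
    rw [hf] at h
    simp only [Option.map_some, Option.some.injEq] at h
    have hm := List.mem_of_find?_eq_some hf
    have hp := List.find?_some hf
    have he1 : e.1 = (st, c) := by simpa using hp
    have : e = ((st, c), st') := by
      cases e with
      | mk a b => simp only at he1 h; rw [he1, h]
    rw [← this]; exact hm

theorem pvTrans_access : ∀ e ∈ pvTrans, pvAccess e.2 = pvAccess e.1.1 ++ [e.1.2] := by decide

theorem pvDelta_space (st : Nat) : pvDelta st ' ' = none := by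
  unfold pvDelta
  rw [List.find?_eq_none.mpr, Option.map_none]
  intro e he hp
  have h1 : e.1 = (st, ' ') := eq_of_beq hp
  have h2 : e.1.2 = ' ' := congrArg Prod.snd h1
  have h3 : e.1.2 ≠ ' ' := by fin_cases he <;> decide
  exact h3 h2

theorem pvRun_append (st : Nat) (w : List Char) (c : Char) :
    pvRun st (w ++ [c]) = (pvRun st w).bind (fun s => pvDelta s c) := by
  induction w generalizing st with
  | nil => simp [pvRun]; cases pvDelta st c <;> simp
  | cons x xs ih =>
    simp only [List.cons_append, pvRun]
    cases pvDelta st x with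
    | none => simp
    | some st' => simpa using ih st'

theorem pvRun_access (w : List Char) (st : Nat) (h : pvRun 0 w = some st) :
    w = pvAccess st := by
  induction w using List.reverseRecOn generalizing st with
  | nil =>
    simp only [pvRun, Option.some.injEq] at h
    rw [← h]; rfl
  | append_singleton w c ih =>
    rw [pvRun_append] at h
    cases hr : pvRun 0 w with
    | none => rw [hr] at h; simp at h
    | some st1 =>
      rw [hr] at h
      simp only [Option.bind_some] at h
      have hmem := pvDelta_mem h
      have hacc := pvTrans_access _ hmem
      simp only at hacc
      rw [ih st1 hr, ← hacc]

-- accepting run ⟺ the read word is a reversed suffix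
def pvAccRun (w : List Char) : Bool :=
  match pvRun 0 w with
  | some st => pvAccept st
  | none => false

theorem pvAccRun_mem (w : List Char) (h : pvAccRun w = true) : w.reverse ∈ pvSuffixesA := by
  unfold pvAccRun at h
  cases hr : pvRun 0 w with
  | none => rw [hr] at h; cases h
  | some st =>
    rw [hr] at h
    have hw := pvRun_access w st hr
    have hst : st = 7 ∨ st = 8 ∨ st = 9 ∨ st = 11 ∨ st = 13 ∨ st = 15 ∨ st = 17 ∨ st = 18 := by
      simpa [pvAccept] using h
    subst hw
    rcases hst with rfl | rfl | rfl | rfl | rfl | rfl | rfl | rfl <;> decide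

theorem pvMem_accRun : ∀ l ∈ pvSuffixesA, pvAccRun l.reverse = true := by decide

-- B's loop on a space-free string returns none
theorem pvBLoop_nospace (rs : List Char) (st : Nat) (hns : ' ' ∉ rs) :
    pvBLoop st rs = none := by
  induction rs generalizing st with
  | nil => rfl
  | cons c rest ih =>
    have hc : (c == ' ') = false := by
      simp only [beq_eq_false_iff_ne]; intro hcc
      exact hns (hcc ▸ List.mem_cons_self ..)
    rw [pvBLoop, hc]
    simp only [Bool.and_false, Bool.false_eq_true, if_false]
    cases pvDelta st c with
    | none => rfl
    | some st' => exact ih st' (fun hm => hns (List.mem_cons_of_mem _ hm))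

-- B's loop up to the first space is the δ-run, then an accept test
theorem pvBLoop_split (xs : List Char) (st : Nat) (t : List Char) (hns : ' ' ∉ xs) :
    pvBLoop st (xs ++ ' ' :: t) =
      match pvRun st xs with
      | some st' => if pvAccept st' then some t.reverse else none
      | none => none := by
  induction xs generalizing st with
  | nil =>
    simp only [List.nil_append, pvBLoop, pvRun]
    cases ha : pvAccept st with
    | true => simp
    | false => simp [pvDelta_space]
  | cons x xs ih =>
    have hx : (x == ' ') = false := by
      simp only [beq_eq_false_iff_ne]; intro hcc
      exact hns (hcc ▸ List.mem_cons_self ..)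
    simp only [List.cons_append, pvBLoop, pvRun, hx]
    simp only [Bool.and_false, Bool.false_eq_true, if_false]
    cases pvDelta st x with
    | none => rfl
    | some st' => exact ih st' (fun hm => hns (List.mem_cons_of_mem _ hm))

-- ===== VERDICT (by name: the statement is the Claim_ definition above) =====
theorem clean_search_term_spec : Claim_equal_clean_search_term := by
  intro s _
  unfold Spec_clean_search_term clean_search_term clean_search_term_alt
  set c := PySem.Chars.strip (PySem.Chars.upper s.toList) with hc
  cases hrp : pvRPartSp c with
  | none =>
    have hns : ' ' ∉ c := (pvRPartSp_none c).mp hrp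
    have hnsr : ' ' ∉ c.reverse := by simpa using hns
    rw [pvALoop_nospace _ _ hns]
    simp only [pvBLoop_nospace _ _ hnsr]
  | some p =>
    obtain ⟨h, l⟩ := p
    obtain ⟨hsplit, hnl⟩ := pvRPartSp_some c h l hrp
    have hnlr : ' ' ∉ l.reverse := by simpa using hnl
    have hrev : (h ++ ' ' :: l).reverse = l.reverse ++ ' ' :: h.reverse := by simp
    rw [hsplit, pvALoop_split pvSuffixesA h l hnl (by decide), hrev,
        pvBLoop_split _ _ _ hnlr]
    cases hr : pvRun 0 l.reverse with
    | none =>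
      have hna : pvAccRun l.reverse = false := by unfold pvAccRun; rw [hr]
      have hnm : l ∉ pvSuffixesA := fun hm => by
        have := pvMem_accRun l hm; rw [hna] at this; cases this
      simp only [if_neg hnm]
    | some st =>
      cases ha : pvAccept st with
      | true =>
        have hm : l ∈ pvSuffixesA := by
          have : pvAccRun l.reverse = true := by unfold pvAccRun; rw [hr]; exact ha
          simpa using pvAccRun_mem _ this
        simp only [if_pos hm, ha, if_pos, List.reverse_reverse]
      | false =>
        have hnm : l ∉ pvSuffixesA := fun hm => by
          have := pvMem_accRun l hm
          simp only [pvAccRun, hr, ha] at this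
          exact Bool.false_ne_true this
        simp only [if_neg hnm, ha, Bool.false_eq_true, if_false]
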